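-- pv_equiv track=rewrite | github.com/Blosc/python-blosc2 | blosc2/ndarray.py | are_partitions_behaved
-- ===== SOURCE A (Python) =====
-- import builtins
--
-- def are_partitions_behaved(shape, chunks, blocks):
--     """
--     Check if the partitions defined by chunks and blocks are well-behaved with shape.
--
--     This makes two checks:
--
--     1. The shape is aligned with the chunks and the chunks are aligned with the blocks.
--     2. The partitions are C-contiguous with respect the outer container.
--
--     This is useful for taking fast paths in code.
--
--     Returns
--     -------
--     bool
--         True if the partitions are well-behaved, False otherwise.
--
--     """
--     # Check alignment
--     alignment_shape_chunks = builtins.all(s % c == 0 for s, c in zip(shape, chunks, strict=True))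
--     if not alignment_shape_chunks:
--         return False
--     alignment_chunks_blocks = builtins.all(c % b == 0 for c, b in zip(chunks, blocks, strict=True))
--     if not alignment_chunks_blocks:
--         return False
--
--     # Check C-contiguity among partitions
--     def check_contiguity(shape, part):
--         ndims = len(shape)
--         inner_dim = ndims - 1
--         for i, size, unit in zip(reversed(range(ndims)), reversed(shape), reversed(part), strict=True):
--             if size > unit:
--                 if i < inner_dim:
--                     if size % unit != 0:
--                         return False
--                 else:
--                     if size != unit:
--                         return False
--                 inner_dim = i
--         return True
--
--     # Check C-contiguity for blocks inside chunks
--     if not check_contiguity(chunks, blocks):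
--         return False
--
--     # Check C-contiguity for chunks inside shape
--     return check_contiguity(shape, chunks)
-- ===== SOURCE B (Python) =====
-- def are_partitions_behaved(shape, chunks, blocks):
--     # Once the modulo-alignment passes, every interior-dimension contiguity test
--     # in A's scan is implied by divisibility, so C-contiguity of both partition
--     # levels reduces to comparing the innermost extents in O(1).
--     if any(s % c for s, c in zip(shape, chunks, strict=True)):
--         return False
--     if any(c % b for c, b in zip(chunks, blocks, strict=True)):
--         return False
--     return not shape or shape[-1] <= chunks[-1] <= blocks[-1]
-- ===== Notes on version B (the rewrite author's own statement) =====
-- stated objective: alternative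
-- what changed: A's per-call check_contiguity (a reversed scan carrying an inner_dim accumulator, run twice over all dimensions) is dropped entirely: after the alignment passes, all interior contiguity tests are implied by divisibility, so B replaces the whole contiguity stage with a single O(1) comparison of the innermost extents shape[-1] <= chunks[-1] <= blocks[-1].
import Mathlib
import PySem

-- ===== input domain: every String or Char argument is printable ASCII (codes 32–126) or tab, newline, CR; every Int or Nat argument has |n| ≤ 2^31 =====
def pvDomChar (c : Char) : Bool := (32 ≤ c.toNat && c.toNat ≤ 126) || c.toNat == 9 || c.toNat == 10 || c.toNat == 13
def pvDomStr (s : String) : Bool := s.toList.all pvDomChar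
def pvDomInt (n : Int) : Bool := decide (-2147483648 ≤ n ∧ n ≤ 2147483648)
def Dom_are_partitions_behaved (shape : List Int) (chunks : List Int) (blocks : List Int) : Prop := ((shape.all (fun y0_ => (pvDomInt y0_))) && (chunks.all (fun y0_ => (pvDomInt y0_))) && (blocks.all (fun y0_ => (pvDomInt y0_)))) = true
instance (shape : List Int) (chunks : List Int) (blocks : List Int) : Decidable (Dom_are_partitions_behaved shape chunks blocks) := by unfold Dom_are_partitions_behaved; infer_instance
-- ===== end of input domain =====

-- B drops A's two reversed inner_dim-tracking contiguity scans: after alignment they are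
-- implied by divisibility except at the innermost extents, so one O(1) comparison remains.

-- ===== PORT A =====
-- the for-loop of check_contiguity: state = inner_dim, early return = false
def ccLoopA : List (Int × Int × Int) → Int → Bool
  | [], _ => true
  | (i, size, unit) :: rest, inner_dim =>
    if size > unit then
      if i < inner_dim then
        if PySem.Int.mod size unit ≠ 0 then false else ccLoopA rest i
      else
        if size ≠ unit then false else ccLoopA rest i
    else ccLoopA rest inner_dim

def checkContiguityA (shape part : List Int) : Bool :=
  let ndims := shape.length
  ccLoopA (((List.range ndims).reverse.map Int.ofNat).zip (shape.reverse.zip part.reverse))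
    ((ndims : Int) - 1)

def are_partitions_behaved (shape : List Int) (chunks : List Int) (blocks : List Int) : Bool :=
  let alignment_shape_chunks := (shape.zip chunks).all (fun p => PySem.Int.mod p.1 p.2 == 0)
  if !alignment_shape_chunks then false
  else
    let alignment_chunks_blocks := (chunks.zip blocks).all (fun p => PySem.Int.mod p.1 p.2 == 0)
    if !alignment_chunks_blocks then false
    else
      if !checkContiguityA chunks blocks then false
      else checkContiguityA shape chunks

-- ===== PORT B =====
def are_partitions_behaved_alt (shape : List Int) (chunks : List Int) (blocks : List Int) : Bool :=
  if (shape.zip chunks).any (fun p => !(PySem.Int.mod p.1 p.2 == 0)) then false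
  else if (chunks.zip blocks).any (fun p => !(PySem.Int.mod p.1 p.2 == 0)) then false
  else
    !shape.isEmpty = false ||
      (decide (PySem.List.pyGetD shape (-1) 0 ≤ PySem.List.pyGetD chunks (-1) 0) &&
       decide (PySem.List.pyGetD chunks (-1) 0 ≤ PySem.List.pyGetD blocks (-1) 0))

-- ===== PRECONDITION & SPEC =====
-- Misalign xs ys: the first ys-divisor-or-alignment violation in zip(xs, ys) is a clean
-- misalignment (nonzero divisor, nonzero remainder), so all(...) short-circuits to False
-- before any ZeroDivisionError or strict-zip ValueError can be raised.
def Misalign (xs ys : List Int) : Prop :=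
  ∃ j < min xs.length ys.length,
    ys.getD j 0 ≠ 0 ∧ PySem.Int.mod (xs.getD j 0) (ys.getD j 0) ≠ 0 ∧
    ∀ k < j, ys.getD k 0 ≠ 0 ∧ PySem.Int.mod (xs.getD k 0) (ys.getD k 0) = 0

-- Pre_ is exactly where A returns: unequal lengths make zip(strict=True) raise ValueError and
-- a zero chunk/block makes % raise ZeroDivisionError, unless an earlier clean misalignment
-- short-circuits the corresponding all(...) to False first.
def Pre_are_partitions_behaved (shape : List Int) (chunks : List Int) (blocks : List Int) : Prop :=
  Misalign shape chunks ∨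
  (shape.length = chunks.length ∧ (∀ c ∈ chunks, c ≠ 0) ∧
    (Misalign chunks blocks ∨ (chunks.length = blocks.length ∧ ∀ b ∈ blocks, b ≠ 0)))
instance (shape : List Int) (chunks : List Int) (blocks : List Int) : Decidable (Pre_are_partitions_behaved shape chunks blocks) := by unfold Pre_are_partitions_behaved Misalign; infer_instance

def pvWitness_are_partitions_behaved : List Int × List Int × List Int := ([8, 4], [4, 4], [2, 2])

def Spec_are_partitions_behaved (shape : List Int) (chunks : List Int) (blocks : List Int) (out : Bool) : Prop := out = are_partitions_behaved_alt shape chunks blocks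
instance (shape : List Int) (chunks : List Int) (blocks : List Int) (out : Bool) : Decidable (Spec_are_partitions_behaved shape chunks blocks out) := by unfold Spec_are_partitions_behaved; infer_instance

-- ===== CLAIM (what is proved, stated in full; the proofs are below) =====
def Claim_equal_are_partitions_behaved : Prop := ∀ (shape : List Int) (chunks : List Int) (blocks : List Int), Dom_are_partitions_behaved shape chunks blocks → Pre_are_partitions_behaved shape chunks blocks → Spec_are_partitions_behaved shape chunks blocks (are_partitions_behaved shape chunks blocks)

-- ===== LEMMAS AND PROOFS =====

theorem zip_reverse_eq {α β : Type} (u : List α) : ∀ (v : List β), u.length = v.length →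
    u.reverse.zip v.reverse = (u.zip v).reverse := by
  induction u with
  | nil => intro v h; simp
  | cons x u' ih =>
    intro v h
    cases v with
    | nil => simp at h
    | cons y v' =>
      simp only [List.length_cons, Nat.add_left_inj] at h
      simp only [List.reverse_cons, List.zip_cons_cons]
      rw [List.zip_append (by simpa using h), ih v' h]
      simp

-- once below the top index, 'i < inner_dim' always holds, so the accumulator is inert
theorem ccLoopA_inert (u : List Int) :
    ∀ (v : List Int) (n : Nat) (d : Int), u.length = n → (n : Int) ≤ d →
    ccLoopA (((List.range n).reverse.map Int.ofNat).zip (u.zip v)) d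
      = (u.zip v).all (fun x => if x.1 > x.2 then PySem.Int.mod x.1 x.2 == 0 else true) := by
  induction u with
  | nil => intro v n d h hd; simp [ccLoopA]
  | cons s u' ih =>
    intro v n d h hd
    cases v with
    | nil => simp [ccLoopA]
    | cons b v' =>
      subst h
      rw [show (s :: u').length = u'.length + 1 from rfl, List.range_succ]
      simp only [List.reverse_append, List.reverse_cons, List.reverse_nil, List.nil_append,
        List.cons_append, List.map_cons, List.zip_cons_cons, List.all_cons]
      have hlt : (u'.length : Int) < d := by
        simp only [List.length_cons] at hd; push_cast at hd; omega
      by_cases hsb : s > b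
      · simp only [ccLoopA, if_pos hsb, Int.ofNat_eq_natCast, if_pos hlt]
        by_cases hm : PySem.Int.mod s b = 0
        · rw [if_neg (by simpa using hm), ih v' u'.length u'.length rfl le_rfl]
          simp [hm]
        · rw [if_pos (by simpa using hm)]
          simp [hm]
      · simp only [ccLoopA, if_neg hsb]
        rw [ih v' u'.length d rfl (le_of_lt hlt)]
        simp

-- under alignment, check_contiguity reduces to the innermost-extent comparison
theorem checkA_of_aligned (shape part : List Int) (h : shape.length = part.length)
    (hal : ((shape.zip part).all fun p => PySem.Int.mod p.1 p.2 == 0) = true) :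
    checkContiguityA shape part
      = (shape.isEmpty || decide (PySem.List.pyGetD shape (-1) 0 ≤ PySem.List.pyGetD part (-1) 0)) := by
  rcases List.eq_nil_or_concat shape with rfl | ⟨s', a, rfl⟩
  · simp [checkContiguityA, ccLoopA]
  · rcases List.eq_nil_or_concat part with rfl | ⟨p', b, rfl⟩
    · simp at h
    · simp only [List.concat_eq_append] at h hal ⊢
      have hl : s'.length = p'.length := by simpa using h
      have hga : PySem.List.pyGetD (s' ++ [a]) (-1) 0 = a := by
        simp [PySem.List.pyGetD, PySem.List.pyGet?, PySem.List.pyIdx?]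
      have hgb : PySem.List.pyGetD (p' ++ [b]) (-1) 0 = b := by
        simp [PySem.List.pyGetD, PySem.List.pyGet?, PySem.List.pyIdx?]
      have h1 : (s' ++ [a]).length = s'.length + 1 := by simp
      have hne : (s' ++ [a]).isEmpty = false := by simp
      rw [List.zip_append (by simpa using hl)] at hal
      simp only [List.all_append, Bool.and_eq_true] at hal
      obtain ⟨halp, -⟩ := hal
      simp only [checkContiguityA, h1, hga, hgb, hne, List.range_succ,
        List.reverse_append, List.reverse_cons, List.reverse_nil, List.nil_append,
        List.cons_append, List.map_cons, List.zip_cons_cons, Bool.false_or]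
      have hd : ((s'.length + 1 : Nat) : Int) - 1 = (s'.length : Int) := by push_cast; ring
      rw [hd]
      by_cases hab : a > b
      · have hane : a ≠ b := ne_of_gt hab
        simp [ccLoopA, hab, hane, not_le.mpr hab]
      · have hle : a ≤ b := not_lt.mp hab
        simp only [ccLoopA, if_neg hab]
        rw [ccLoopA_inert s'.reverse p'.reverse s'.length (s'.length : Int) (by simp) le_rfl]
        rw [zip_reverse_eq s' p' hl, List.all_reverse]
        rw [decide_eq_true hle]
        rw [List.all_eq_true] at halp ⊢
        intro x hx
        have := halp x hx
        simp only [this]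
        split <;> rfl

theorem misalign_all_false (xs ys : List Int) (hm : Misalign xs ys) :
    ((xs.zip ys).all fun p => PySem.Int.mod p.1 p.2 == 0) = false := by
  obtain ⟨j, hj, hz, hmod, -⟩ := hm
  have hjx : j < xs.length := lt_of_lt_of_le hj (min_le_left _ _)
  have hjy : j < ys.length := lt_of_lt_of_le hj (min_le_right _ _)
  have hjz : j < (xs.zip ys).length := by rw [List.length_zip]; omega
  rw [List.all_eq_false]
  refine ⟨(xs.zip ys)[j], List.getElem_mem _, ?_⟩
  rw [List.getElem_zip]
  rw [List.getD_eq_getElem xs 0 hjx, List.getD_eq_getElem ys 0 hjy] at hmod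
  simpa using hmod

-- ===== VERDICT (by name: the statement is the Claim_ definition above) =====
theorem are_partitions_behaved_spec : Claim_equal_are_partitions_behaved := by
  intro shape chunks blocks _hdom hpre
  unfold Spec_are_partitions_behaved are_partitions_behaved are_partitions_behaved_alt
  have g1 : ((shape.zip chunks).any fun p => !(PySem.Int.mod p.1 p.2 == 0))
      = !((shape.zip chunks).all fun p => PySem.Int.mod p.1 p.2 == 0) :=
    Eq.symm List.not_all_eq_any_not
  have g2 : ((chunks.zip blocks).any fun p => !(PySem.Int.mod p.1 p.2 == 0))
      = !((chunks.zip blocks).all fun p => PySem.Int.mod p.1 p.2 == 0) :=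
    Eq.symm List.not_all_eq_any_not
  rw [g1, g2]
  cases hA1 : (shape.zip chunks).all fun p => PySem.Int.mod p.1 p.2 == 0 with
  | false => simp
  | true =>
    have hrest : shape.length = chunks.length ∧
        (Misalign chunks blocks ∨ (chunks.length = blocks.length ∧ ∀ b ∈ blocks, b ≠ 0)) := by
      rcases hpre with hm | ⟨ha, -, hb⟩
      · rw [misalign_all_false shape chunks hm] at hA1; cases hA1
      · exact ⟨ha, hb⟩
    obtain ⟨h1, hrest⟩ := hrest
    cases hA2 : (chunks.zip blocks).all fun p => PySem.Int.mod p.1 p.2 == 0 with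
    | false => simp
    | true =>
      have h2 : chunks.length = blocks.length := by
        rcases hrest with hm | ⟨hb, -⟩
        · rw [misalign_all_false chunks blocks hm] at hA2; cases hA2
        · exact hb
      rw [checkA_of_aligned chunks blocks h2 hA2, checkA_of_aligned shape chunks h1 hA1]
      have he1 : chunks.isEmpty = shape.isEmpty := by
        cases shape with
        | nil => cases chunks with
          | nil => rfl
          | cons c cs => simp at h1
        | cons s ss => cases chunks with
          | nil => simp at h1
          | cons c cs => rfl
      rw [he1]
      cases h : shape.isEmpty <;>
        cases decide (PySem.List.pyGetD shape (-1) 0 ≤ PySem.List.pyGetD chunks (-1) 0) <;>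
        cases decide (PySem.List.pyGetD chunks (-1) 0 ≤ PySem.List.pyGetD blocks (-1) 0) <;> simp
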